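-- pv_equiv track=rewrite | github.com/ZorAnderius/goitneo-python-hw-2-MCS3 | Task1/main.py | sorted_users_notes
-- ===== SOURCE A (Python) =====
-- def sorted_users_notes(users_birthdays_dict, current_day):
--     first_dict = dict()
--     second_dict = dict()
--     for day, values in users_birthdays_dict:
--         if day >= current_day:
--             first_dict[day] = values
--         else:
--             second_dict[day] = values
--     return first_dict | second_dict
-- ===== SOURCE B (Python) =====
-- def sorted_users_notes(users_birthdays_dict, current_day):
--     # One pass over a stably sorted sequence: entries with day >= current_day
--     # (key False) come first, entries with day < current_day (key True) after,
--     # each group keeping input order; dict() keeps first position, last value.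
--     return dict(sorted(users_birthdays_dict, key=lambda kv: kv[0] < current_day))
-- ===== Notes on version B (the rewrite author's own statement) =====
-- stated objective: simpler
-- what changed: Replaces the two accumulated dicts and their merge with a single dict built from the input stably sorted by the boolean key day < current_day, which partitions while preserving per-group order and last-duplicate-wins semantics.
import Mathlib
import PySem

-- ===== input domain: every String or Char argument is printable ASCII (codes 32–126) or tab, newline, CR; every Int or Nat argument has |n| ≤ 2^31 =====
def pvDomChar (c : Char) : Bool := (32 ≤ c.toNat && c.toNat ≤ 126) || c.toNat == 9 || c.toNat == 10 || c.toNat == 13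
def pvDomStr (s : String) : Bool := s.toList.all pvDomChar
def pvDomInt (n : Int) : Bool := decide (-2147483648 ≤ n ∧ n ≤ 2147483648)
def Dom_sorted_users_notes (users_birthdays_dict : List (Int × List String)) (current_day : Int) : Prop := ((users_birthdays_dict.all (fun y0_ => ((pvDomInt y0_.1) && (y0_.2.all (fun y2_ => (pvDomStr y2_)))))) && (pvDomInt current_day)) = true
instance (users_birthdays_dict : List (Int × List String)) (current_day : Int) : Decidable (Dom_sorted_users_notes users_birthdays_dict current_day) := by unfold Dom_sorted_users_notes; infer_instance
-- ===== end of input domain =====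

-- B builds one dict from the input stably sorted by the boolean key (day < current_day)
-- instead of A's two accumulated dicts merged with `|`; same return value, different construction.

-- ===== PORT A =====
-- A: fill first_dict/second_dict in one loop, then return first_dict | second_dict
-- (d1 | d2 = copy of d1 updated with d2's items; dict → assoc list of items).
def sorted_users_notes (users_birthdays_dict : List (Int × List String)) (current_day : Int) : List (Int × List String) :=
  let pair := users_birthdays_dict.foldl
    (fun (st : PySem.Dict Int (List String) × PySem.Dict Int (List String)) kv =>
      if kv.1 ≥ current_day then (st.1.insert kv.1 kv.2, st.2)
      else (st.1, st.2.insert kv.1 kv.2))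
    (PySem.Dict.empty, PySem.Dict.empty)
  (pair.1.update pair.2.items).items

-- ===== PORT B =====
-- B: dict(sorted(xs, key=lambda kv: kv[0] < current_day)) — stable sort by a Bool key, then one dict.
def sorted_users_notes_alt (users_birthdays_dict : List (Int × List String)) (current_day : Int) : List (Int × List String) :=
  (PySem.Dict.ofList
    (PySem.List.sorted users_birthdays_dict (fun kv => decide (kv.1 < current_day)) false)).items

-- ===== PRECONDITION & SPEC =====
def Spec_sorted_users_notes (users_birthdays_dict : List (Int × List String)) (current_day : Int) (out : List (Int × List String)) : Prop := out = sorted_users_notes_alt users_birthdays_dict current_day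
instance (users_birthdays_dict : List (Int × List String)) (current_day : Int) (out : List (Int × List String)) : Decidable (Spec_sorted_users_notes users_birthdays_dict current_day out) := by unfold Spec_sorted_users_notes; infer_instance

-- ===== CLAIM (what is proved, stated in full; the proofs are below) =====
def Claim_equal_sorted_users_notes : Prop := ∀ (users_birthdays_dict : List (Int × List String)) (current_day : Int), Dom_sorted_users_notes users_birthdays_dict current_day → Spec_sorted_users_notes users_birthdays_dict current_day (sorted_users_notes users_birthdays_dict current_day)

-- ===== LEMMAS AND PROOFS =====

-- A's loop with two dict accumulators is the two filtered update-loops.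
theorem pv_fold_split (c : Int) (xs : List (Int × List String))
    (d1 d2 : PySem.Dict Int (List String)) :
    xs.foldl
      (fun (st : PySem.Dict Int (List String) × PySem.Dict Int (List String)) kv =>
        if kv.1 ≥ c then (st.1.insert kv.1 kv.2, st.2)
        else (st.1, st.2.insert kv.1 kv.2)) (d1, d2)
    = (d1.update (xs.filter (fun kv => decide (c ≤ kv.1))),
       d2.update (xs.filter (fun kv => decide (kv.1 < c)))) := by
  induction xs generalizing d1 d2 with
  | nil => simp [PySem.Dict.update]
  | cons kv t ih =>
    by_cases h : c ≤ kv.1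
    · simp [List.foldl_cons, h, not_lt.mpr h, ih, PySem.Dict.update, ge_iff_le]
    · simp [List.foldl_cons, h, not_le.mp h, ih, PySem.Dict.update, ge_iff_le]

-- insertBy passes over a prefix it does not insert before.
theorem pv_insertBy_append {α : Type} (before : α → α → Bool) (x : α) (A B : List α)
    (h : ∀ y ∈ A, before x y = false) :
    PySem.List.insertBy before x (A ++ B) = A ++ PySem.List.insertBy before x B := by
  induction A with
  | nil => simp
  | cons a t ih =>
    have ha : before x a = false := h a (by simp)
    simp [PySem.List.insertBy, ha, ih (fun y hy => h y (by simp [hy]))]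

-- Sorting by a Bool-valued key is the stable partition: false-group first, true-group after.
theorem pv_sorted_bool_partition {α : Type} (p : α → Bool) (xs : List α) :
    PySem.List.sorted xs p false = xs.filter (fun x => !p x) ++ xs.filter p := by
  induction xs using List.reverseRecOn with
  | nil => simp [PySem.List.sorted]
  | append_singleton t x ih =>
    have hstep : PySem.List.sorted (t ++ [x]) p false
        = PySem.List.insertBy (fun a b => decide (p a < p b)) x (PySem.List.sorted t p false) := by
      simp [PySem.List.sorted, List.foldl_append]
    rw [hstep, ih]
    by_cases hx : p x = true
    · have hall : ∀ y ∈ t.filter (fun x => !p x) ++ t.filter p,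
          (fun a b => decide (p a < p b)) x y = false := by
        intro y _; simp [hx, Bool.lt_iff]
      rw [PySem.List.insertBy_of_forall_not_before _ _ _ hall]
      simp [List.filter_append, hx, List.append_assoc]
    · have hx' : p x = false := by simpa using hx
      have hpre : ∀ y ∈ t.filter (fun x => !p x), (fun a b => decide (p a < p b)) x y = false := by
        intro y hy
        have : p y = false := by simpa using (List.mem_filter.mp hy).2
        simp [hx', this]
      rw [pv_insertBy_append _ _ _ _ hpre]
      cases hB : t.filter p with
      | nil => simp [List.filter_append, hx', hB, PySem.List.insertBy]
      | cons b bt =>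
        have hb : p b = true := by
          have : b ∈ t.filter p := by rw [hB]; simp
          simpa using (List.mem_filter.mp this).2
        simp [List.filter_append, hx', hB, PySem.List.insertBy, hb, Bool.lt_iff]

-- keys of dict(ps) are exactly the distinct first components of ps.
theorem pv_keys_ofList (ps : List (Int × List String)) :
    (PySem.Dict.ofList ps).keys = PySem.Set.ofList (ps.map Prod.fst) := by
  have h := PySem.Dict.keys_foldl_insert_key (ν := List String) ps Prod.fst
      (fun _ x => x.2) PySem.Dict.empty
  simpa [PySem.Dict.ofList, PySem.Dict.update, PySem.Dict.keys_empty,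
    PySem.Set.update_nil_left] using h

-- Updating with keys fresh for d appends dict(l)'s items after d's items.
theorem pv_update_disjoint (l : List (Int × List String)) (d : PySem.Dict Int (List String))
    (h : ∀ q ∈ l, d.contains q.1 = false) :
    (d.update l).items = d.items ++ (PySem.Dict.ofList l).items := by
  induction l using List.reverseRecOn with
  | nil => simp [PySem.Dict.update, PySem.Dict.ofList, PySem.Dict.empty]
  | append_singleton t q ih =>
    have hq : d.contains q.1 = false := h q (by simp)
    have hih := ih (fun q' hq' => h q' (by simp [hq']))
    have hDitems : (d.update t).items = d.items ++ (PySem.Dict.ofList t).items := hih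
    have hupd : d.update (t ++ [q]) = (d.update t).insert q.1 q.2 := by
      simp [PySem.Dict.update, List.foldl_append]
    have hofl : PySem.Dict.ofList (t ++ [q]) = (PySem.Dict.ofList t).insert q.1 q.2 := by
      simp [PySem.Dict.ofList, PySem.Dict.update, List.foldl_append]
    have hDkeys : (d.update t).keys = d.keys ++ (PySem.Dict.ofList t).keys := by
      simp only [PySem.Dict.keys, hDitems, List.map_append]
    have hqd : q.1 ∉ d.keys := by
      intro hm
      exact absurd ((PySem.Dict.contains_iff_mem_keys d q.1).mpr hm) (by simp [hq])
    by_cases hc : (PySem.Dict.ofList t).contains q.1 = true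
    · have hDc : (d.update t).contains q.1 = true := by
        rw [PySem.Dict.contains_iff_mem_keys, hDkeys]
        exact List.mem_append_right _ ((PySem.Dict.contains_iff_mem_keys _ _).mp hc)
      rw [hupd, hofl, PySem.Dict.items_insert_of_contains _ _ hDc,
        PySem.Dict.items_insert_of_contains _ _ hc, hDitems, List.map_append]
      have hdid : d.items.map (fun p => if (p.1 == q.1) = true then (q.1, q.2) else p) = d.items := by
        conv_rhs => rw [← List.map_id d.items]
        apply List.map_congr_left
        intro p hp
        have hne : p.1 ≠ q.1 := by
          intro he
          exact hqd (he ▸ (by simp only [PySem.Dict.keys]; exact List.mem_map_of_mem hp))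
        simp [hne]
      rw [hdid]
    · have hc' : (PySem.Dict.ofList t).contains q.1 = false := by simpa using hc
      have hDc : (d.update t).contains q.1 = false := by
        rw [← Bool.not_eq_true, PySem.Dict.contains_iff_mem_keys, hDkeys]
        intro hm
        rcases List.mem_append.mp hm with hm | hm
        · exact hqd hm
        · exact absurd ((PySem.Dict.contains_iff_mem_keys _ _).mpr hm) (by simp [hc'])
      rw [hupd, hofl, PySem.Dict.items_insert_of_not_contains _ _ hDc,
        PySem.Dict.items_insert_of_not_contains _ _ hc', hDitems, List.append_assoc]

-- dict(d.items) = d at the items level (keys of a dict are distinct, so every insert is fresh).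
theorem pv_ofList_items (d : PySem.Dict Int (List String)) (hnd : d.keys.Nodup) :
    (PySem.Dict.ofList d.items).items = d.items := by
  have h := PySem.Dict.items_foldl_insert_fresh (ν := List String) d.items Prod.fst Prod.snd
      PySem.Dict.empty (by intro a _; simp [PySem.Dict.contains_empty])
      (by simpa only [PySem.Dict.keys] using hnd)
  simpa [PySem.Dict.ofList, PySem.Dict.update] using h

-- dict(filter(day >= c)) contains no key below c.
theorem pv_ge_not_contains (xs : List (Int × List String)) (c k : Int) (hk : k < c) :
    (PySem.Dict.ofList (xs.filter (fun kv => decide (c ≤ kv.1)))).contains k = false := by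
  rw [← Bool.not_eq_true, PySem.Dict.contains_iff_mem_keys, pv_keys_ofList]
  intro hm
  have hm' := (PySem.Set.mem_ofList _ _).mp hm
  rcases List.mem_map.mp hm' with ⟨kv, hkv, hfst⟩
  have hle : c ≤ kv.1 := of_decide_eq_true (List.mem_filter.mp hkv).2
  omega

-- the two predicates agree: not (day < c) ↔ c ≤ day.
theorem pv_pred_eq (c : Int) :
    (fun kv : Int × List String => !decide (kv.1 < c)) = (fun kv => decide (c ≤ kv.1)) := by
  funext kv
  by_cases h : kv.1 < c
  · simp [h, not_le.mpr h]
  · simp [h, not_lt.mp h]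

-- ===== VERDICT (by name: the statement is the Claim_ definition above) =====
theorem sorted_users_notes_spec : Claim_equal_sorted_users_notes := by
  intro xs c _
  unfold Spec_sorted_users_notes sorted_users_notes sorted_users_notes_alt
  rw [pv_fold_split]
  have hdisl : ∀ q ∈ xs.filter (fun kv => decide (kv.1 < c)),
      (PySem.Dict.ofList (xs.filter (fun kv => decide (c ≤ kv.1)))).contains q.1 = false := by
    intro q hq
    exact pv_ge_not_contains xs c q.1 (by simpa using (List.mem_filter.mp hq).2)
  have hA : (PySem.Dict.update PySem.Dict.empty (xs.filter (fun kv => decide (c ≤ kv.1)))) =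
      PySem.Dict.ofList (xs.filter (fun kv => decide (c ≤ kv.1))) := rfl
  have hA2 : (PySem.Dict.update PySem.Dict.empty (xs.filter (fun kv => decide (kv.1 < c)))) =
      PySem.Dict.ofList (xs.filter (fun kv => decide (kv.1 < c))) := rfl
  simp only [hA, hA2]
  -- A's side
  rw [pv_update_disjoint _ _ (by
    intro q hq
    have hq1 : q.1 ∈ (PySem.Dict.ofList (xs.filter (fun kv => decide (kv.1 < c)))).keys := by
      simp only [PySem.Dict.keys]; exact List.mem_map_of_mem hq
    rw [pv_keys_ofList] at hq1
    rcases List.mem_map.mp ((PySem.Set.mem_ofList _ _).mp hq1) with ⟨kv, hkv, hfst⟩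
    have hlt : kv.1 < c := of_decide_eq_true (List.mem_filter.mp hkv).2
    exact pv_ge_not_contains xs c q.1 (by omega))]
  rw [pv_ofList_items _ (PySem.Dict.nodup_keys_ofList _)]
  -- B's side
  rw [pv_sorted_bool_partition, pv_pred_eq]
  have hof : PySem.Dict.ofList (xs.filter (fun kv => decide (c ≤ kv.1)) ++ xs.filter (fun kv => decide (kv.1 < c)))
      = (PySem.Dict.ofList (xs.filter (fun kv => decide (c ≤ kv.1)))).update (xs.filter (fun kv => decide (kv.1 < c))) := by
    simp [PySem.Dict.ofList, PySem.Dict.update, List.foldl_append]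
  rw [hof, pv_update_disjoint _ _ hdisl]
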